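-- pv_equiv track=rewrite | github.com/DmitryBozhko/CPU-Design-and-Simulation-Project | tests/numeric/test_float32_mul_basic.py | _hex_from_bits_ieee
-- ===== SOURCE A (Python) =====
-- def _hex_from_bits_ieee(bits: list[int]) -> str:
--     """Convert LSB-first bit list (length >= 32) to 8-hex-digit IEEE-754 word."""
--     value = 0
--     limit = 32
--     idx = 0
--     while idx < limit and idx < len(bits):
--         bit = bits[idx] & 1
--         if bit:
--             value |= 1 << idx
--         idx = idx + 1
--     return f"{value:08X}"
-- ===== SOURCE B (Python) =====
-- def _hex_from_bits_ieee(bits: list[int]) -> str: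
--     """Build the 8-hex-digit word nibble by nibble, most-significant first."""
--     n = len(bits)
--     digits = []
--     for nib in range(7, -1, -1):
--         base = nib * 4
--         v = 0
--         for k in range(4):
--             i = base + k
--             if i < n:
--                 v += (bits[i] & 1) << k
--         digits.append("0123456789ABCDEF"[v])
--     return "".join(digits)
-- ===== Notes on version B (the rewrite author's own statement) =====
-- stated objective: alternative
-- what changed: B builds the 8-hex-digit string nibble by nibble (most-significant first), summing four masked bits per output character, instead of accumulating a 32-bit integer with shift-or and then formatting it with f"{value:08X}".
import Mathlib
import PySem

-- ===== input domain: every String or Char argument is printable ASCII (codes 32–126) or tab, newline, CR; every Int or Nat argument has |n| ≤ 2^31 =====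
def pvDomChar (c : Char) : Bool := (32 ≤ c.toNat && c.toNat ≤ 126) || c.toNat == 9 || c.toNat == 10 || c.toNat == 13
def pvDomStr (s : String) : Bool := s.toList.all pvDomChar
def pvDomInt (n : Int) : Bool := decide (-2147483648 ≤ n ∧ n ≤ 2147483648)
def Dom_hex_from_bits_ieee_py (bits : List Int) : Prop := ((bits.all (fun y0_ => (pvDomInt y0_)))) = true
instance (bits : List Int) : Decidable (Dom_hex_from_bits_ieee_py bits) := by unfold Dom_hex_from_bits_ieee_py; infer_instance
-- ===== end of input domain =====

-- B builds the 8-hex word nibble by nibble (MSB first) instead of accumulating one 32-bit integer and formatting it; same values, different decomposition.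

-- ===== PORT A =====
-- the hex digit table "0123456789ABCDEF" as chars
def pvHexTable : List Char := ['0','1','2','3','4','5','6','7','8','9','A','B','C','D','E','F']

-- hand port of Python's f"{value:08X}" hex digits (exact for value ≥ 0): base-16 digits, MSB first
def pvHexRec (n : Nat) : List Char :=
  if _h : n < 16 then [pvHexTable.getD n '0']
  else pvHexRec (n / 16) ++ [pvHexTable.getD (n % 16) '0']
  decreasing_by exact Nat.div_lt_self (by omega) (by omega)

-- the zero padding to width 8 of f"{value:08X}" (exact for value ≥ 0)
def pvFmt08X (value : Int) : String :=
  let ds := pvHexRec value.toNat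
  String.mk (List.replicate (8 - ds.length) '0' ++ ds)

def hex_from_bits_ieee_py (bits : List Int) : String :=
  let limit : Nat := 32
  -- while idx < limit and idx < len(bits): one foldl step per idx
  let value : Int := (List.range (min limit bits.length)).foldl
    (fun value idx =>
      let bit := PySem.Int.band (bits.getD idx 0) 1
      if bit ≠ 0 then PySem.Int.bor value ((1:Int) <<< idx) else value) 0
  pvFmt08X value

-- ===== PORT B =====
def hex_from_bits_ieee_py_alt (bits : List Int) : String :=
  let n := bits.length
  -- for nib in range(7, -1, -1)
  let digits := (List.range 8).reverse.map (fun nib =>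
    let base := nib * 4
    let v : Int := (List.range 4).foldl (fun v k =>
      let i := base + k
      if i < n then v + (PySem.Int.band (bits.getD i 0) 1) <<< k else v) 0
    "0123456789ABCDEF".toList.getD v.toNat '0')
  String.mk digits

-- ===== PRECONDITION & SPEC =====
def Spec_hex_from_bits_ieee_py (bits : List Int) (out : String) : Prop := out = hex_from_bits_ieee_py_alt bits
instance (bits : List Int) (out : String) : Decidable (Spec_hex_from_bits_ieee_py bits out) := by unfold Spec_hex_from_bits_ieee_py; infer_instance

-- ===== CLAIM (what is proved, stated in full; the proofs are below) =====
def Claim_equal_hex_from_bits_ieee_py : Prop := ∀ (bits : List Int), Dom_hex_from_bits_ieee_py bits → Spec_hex_from_bits_ieee_py bits (hex_from_bits_ieee_py bits)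

-- ===== LEMMAS AND PROOFS =====

-- the bit A and B read at position i (0 once past the end of the list)
def pvBit (bits : List Int) (i : Nat) : Nat := (PySem.Int.band (bits.getD i 0) 1).toNat

-- the integer A has accumulated after m loop iterations
def pvVal (bits : List Int) (m : Nat) : Nat := ∑ i ∈ Finset.range m, pvBit bits i * 2^i

-- the j-th nibble B computes
def pvNib (bits : List Int) (j : Nat) : Nat := ∑ k ∈ Finset.range 4, pvBit bits (j*4+k) * 2^k

theorem pvBit_le_one (bits : List Int) (i : Nat) : pvBit bits i ≤ 1 := by
  unfold pvBit
  rw [PySem.Int.band_one]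
  have h1 : PySem.Int.mod (bits.getD i 0) 2 < 2 := PySem.Int.mod_lt _ (by omega)
  omega

theorem pvBit_int (bits : List Int) (i : Nat) :
    PySem.Int.band (bits.getD i 0) 1 = (pvBit bits i : Int) := by
  unfold pvBit
  rw [Int.toNat_of_nonneg]
  rw [PySem.Int.band_one]
  exact PySem.Int.mod_nonneg _ (by omega)

theorem pvBit_of_ge (bits : List Int) (i : Nat) (h : bits.length ≤ i) : pvBit bits i = 0 := by
  unfold pvBit
  rw [List.getD_eq_default _ _ h]
  decide

theorem pvVal_lt (bits : List Int) (m : Nat) : pvVal bits m < 2^m := by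
  induction m with
  | zero => simp [pvVal]
  | succ m ih =>
    unfold pvVal at ih ⊢
    rw [Finset.sum_range_succ]
    have := pvBit_le_one bits m
    have h2 : pvBit bits m * 2^m ≤ 2^m := by
      calc pvBit bits m * 2^m ≤ 1 * 2^m := Nat.mul_le_mul_right _ this
        _ = 2^m := by ring
    have : (2:Nat)^(m+1) = 2^m + 2^m := by ring
    omega

theorem lor_two_pow_of_lt {a i : Nat} (h : a < 2^i) : a ||| 2^i = a + 2^i := by
  rw [Nat.add_comm]
  apply Nat.eq_of_testBit_eq
  intro k
  rcases lt_trichotomy k i with hk | rfl | hk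
  · rw [Nat.testBit_two_pow_add_gt hk, Nat.testBit_lor,
      Nat.testBit_two_pow_of_ne (by omega), Bool.or_false]
  · rw [Nat.testBit_two_pow_add_eq, Nat.testBit_lor,
      Nat.testBit_eq_false_of_lt h, Nat.testBit_two_pow_self]
    decide
  · have hik : (2:Nat)^(i+1) ≤ 2^k := Nat.pow_le_pow_right (by omega) hk
    have h1 : 2^i + a < 2^k := by
      have : (2:Nat)^(i+1) = 2^i + 2^i := by ring
      omega
    rw [Nat.testBit_eq_false_of_lt h1, Nat.testBit_lor,
      Nat.testBit_eq_false_of_lt (by omega), Nat.testBit_two_pow_of_ne (by omega)]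
    decide

-- A's loop computes pvVal
theorem pvA_loop (bits : List Int) (m : Nat) :
    (List.range m).foldl
      (fun value idx =>
        let bit := PySem.Int.band (bits.getD idx 0) 1
        if bit ≠ 0 then PySem.Int.bor value ((1:Int) <<< idx) else value) 0
    = (pvVal bits m : Int) := by
  induction m with
  | zero => simp [pvVal]
  | succ m ih =>
    rw [List.range_succ, List.foldl_append, ih]
    simp only [List.foldl_cons, List.foldl_nil]
    rw [pvBit_int]
    have hb := pvBit_le_one bits m
    have hlt := pvVal_lt bits m
    rcases (by omega : pvBit bits m = 0 ∨ pvBit bits m = 1) with h | h <;> rw [h]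
    · simp [pvVal, Finset.sum_range_succ, h]
    · norm_num
      rw [Int.shiftLeft_eq, one_mul]
      have h2 : ((2:Int)^m) = ((2^m : Nat) : Int) := by push_cast; ring
      rw [h2, PySem.Int.bor_natCast, lor_two_pow_of_lt hlt]
      unfold pvVal
      rw [Finset.sum_range_succ, h]
      push_cast
      ring

-- beyond the list the bits are 0, so stopping at min 32 len loses nothing
theorem pvVal_min (bits : List Int) : pvVal bits (min 32 bits.length) = pvVal bits 32 := by
  unfold pvVal
  apply Finset.sum_subset
  · intro i hi
    simp only [Finset.mem_range] at hi ⊢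
    omega
  · intro i hi hni
    simp only [Finset.mem_range] at hi hni
    have : bits.length ≤ i := by omega
    rw [pvBit_of_ge bits i this]
    ring

theorem pvNib_lt (bits : List Int) (j : Nat) : pvNib bits j < 16 := by
  unfold pvNib
  have h0 := pvBit_le_one bits (j*4)
  have h1 := pvBit_le_one bits (j*4+1)
  have h2 := pvBit_le_one bits (j*4+2)
  have h3 := pvBit_le_one bits (j*4+3)
  simp [Finset.sum_range_succ]
  omega

-- regrouping: the 32-bit value is the base-16 number with digits pvNib
theorem pvNib_eq (bits : List Int) (j : Nat) :
    pvNib bits j = pvBit bits (j*4) + pvBit bits (j*4+1)*2 + pvBit bits (j*4+2)*4 + pvBit bits (j*4+3)*8 := by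
  unfold pvNib
  rw [Finset.sum_range_succ, Finset.sum_range_succ, Finset.sum_range_succ,
    Finset.sum_range_succ, Finset.sum_range_zero]
  norm_num

theorem pvVal_group (bits : List Int) (w : Nat) :
    pvVal bits (w*4) = ∑ j ∈ Finset.range w, pvNib bits j * 16^j := by
  induction w with
  | zero => simp [pvVal]
  | succ w ih =>
    rw [Finset.sum_range_succ, ← ih]
    unfold pvVal
    rw [show (w+1)*4 = w*4+1+1+1+1 by ring]
    rw [Finset.sum_range_succ, Finset.sum_range_succ, Finset.sum_range_succ, Finset.sum_range_succ]
    rw [show w*4+1+1+1 = w*4+3 by ring, show w*4+1+1 = w*4+2 by ring]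
    have e16 : (16:Nat)^w = 2^(w*4) := by
      rw [show (16:Nat) = 2^4 by norm_num, ← pow_mul, Nat.mul_comm]
    rw [pvNib_eq, e16]
    rw [show w*4+3 = w*4+3 from rfl, pow_add, pow_add, pow_add]
    ring

-- digit extraction from a base-16 numeral
theorem pvDigit_extract (j : Nat) : ∀ (w : Nat) (f : Nat → Nat), (∀ i, f i < 16) → j < w →
    (∑ j' ∈ Finset.range w, f j' * 16^j') / 16^j % 16 = f j := by
  induction j with
  | zero =>
    intro w f hf hj
    obtain ⟨w', rfl⟩ : ∃ w', w = w'+1 := ⟨w-1, by omega⟩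
    rw [Finset.sum_range_succ' (fun j' => f j' * 16^j') w']
    simp only [pow_zero, Nat.pow_zero, mul_one, Nat.div_one]
    have : ∑ j' ∈ Finset.range w', f (j'+1) * 16^(j'+1) = 16 * ∑ j' ∈ Finset.range w', f (j'+1) * 16^j' := by
      rw [Finset.mul_sum]
      apply Finset.sum_congr rfl
      intro i _
      rw [pow_succ]
      ring
    rw [this, Nat.add_comm, Nat.add_mul_mod_self_left, Nat.mod_eq_of_lt (hf 0)]
  | succ j ih =>
    intro w f hf hj
    obtain ⟨w', rfl⟩ : ∃ w', w = w'+1 := ⟨w-1, by omega⟩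
    rw [Finset.sum_range_succ' (fun j' => f j' * 16^j') w']
    have hs : ∑ j' ∈ Finset.range w', f (j'+1) * 16^(j'+1) + f 0 * 16^0
        = 16 * (∑ j' ∈ Finset.range w', f (j'+1) * 16^j') + f 0 := by
      rw [Finset.mul_sum]
      simp only [pow_zero, mul_one]
      congr 1
      apply Finset.sum_congr rfl
      intro i _
      rw [pow_succ]
      ring
    rw [hs, pow_succ, Nat.mul_comm (16^j) 16, ← Nat.div_div_eq_div_mul]
    rw [Nat.mul_add_div (by omega), Nat.div_eq_of_lt (hf 0), Nat.add_zero]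
    exact ih w' (fun i => f (i+1)) (fun i => hf (i+1)) (by omega)

-- the zero-padded hex string of v < 16^w lists the base-16 digits of v, MSB first
theorem pvPad_hex (w : Nat) (v : Nat) (hw : 0 < w) (hv : v < 16^w) :
    List.replicate (w - (pvHexRec v).length) '0' ++ pvHexRec v
    = (List.range w).reverse.map (fun j => pvHexTable.getD (v / 16^j % 16) '0') := by
  induction w generalizing v with
  | zero => omega
  | succ w ih =>
    rcases Nat.eq_zero_or_pos w with rfl | hw'
    · -- w = 1
      have hv16 : v < 16 := by simpa using hv
      rw [pvHexRec, dif_pos hv16]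
      simp [Nat.mod_eq_of_lt hv16]
    · -- step
      have hstep : List.replicate (w + 1 - (pvHexRec v).length) '0' ++ pvHexRec v
          = (List.replicate (w - (pvHexRec (v/16)).length) '0' ++ pvHexRec (v/16))
            ++ [pvHexTable.getD (v % 16) '0'] := by
        by_cases h16 : v < 16
        · rw [pvHexRec, dif_pos h16]
          have : v / 16 = 0 := Nat.div_eq_of_lt h16
          rw [this]
          rw [show pvHexRec 0 = ['0'] by rw [pvHexRec]; rfl]
          simp only [List.length_cons, List.length_nil]
          rw [Nat.mod_eq_of_lt h16]
          have hrep : List.replicate (w - 1) '0' ++ ['0'] = List.replicate w '0' := by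
            rw [← List.replicate_succ']
            congr 1
            omega
          congr 1
          rw [show w+1-1 = w from rfl]
          exact hrep.symm
        · rw [pvHexRec, dif_neg h16]
          rw [List.length_append, List.length_cons, List.length_nil]
          rw [List.append_assoc]
          congr 2
          omega
      rw [hstep]
      have hdiv : v / 16 < 16^w := by
        rw [Nat.div_lt_iff_lt_mul (by omega)]
        calc v < 16^(w+1) := hv
          _ = 16^w * 16 := by rw [pow_succ]
      rw [ih (v/16) hw' hdiv]
      rw [List.range_succ_eq_map, List.reverse_cons, List.map_append]
      congr 1
      · rw [← List.map_reverse, List.map_map]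
        apply List.map_congr_left
        intro j _
        simp only [Function.comp_apply, Nat.succ_eq_add_one]
        rw [Nat.div_div_eq_div_mul, ← pow_succ']
      · simp

-- B's inner fold computes pvNib
theorem pvB_inner (bits : List Int) (nib : Nat) :
    (List.range 4).foldl (fun v k =>
      let i := nib * 4 + k
      if i < bits.length then v + (PySem.Int.band (bits.getD i 0) 1) <<< k else v) (0:Int)
    = (pvNib bits nib : Int) := by
  have hstep : ∀ (v : Int) (k : Nat),
      (let i := nib * 4 + k
       if i < bits.length then v + (PySem.Int.band (bits.getD i 0) 1) <<< k else v)
      = v + (pvBit bits (nib*4+k) : Int) * 2^k := by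
    intro v k
    by_cases h : nib*4+k < bits.length
    · simp only [h, if_pos, pvBit_int, Int.shiftLeft_eq]
    · simp only [h, if_neg, not_false_iff]
      rw [pvBit_of_ge bits _ (by omega)]
      simp
  show (List.range 4).foldl _ _ = _
  rw [show List.range 4 = [0,1,2,3] from rfl]
  simp only [List.foldl_cons, List.foldl_nil]
  rw [hstep, hstep, hstep, hstep]
  unfold pvNib
  rw [Finset.sum_range_succ, Finset.sum_range_succ, Finset.sum_range_succ,
    Finset.sum_range_succ, Finset.sum_range_zero]
  push_cast
  ring

-- ===== VERDICT (by name: the statement is the Claim_ definition above) =====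
theorem hex_from_bits_ieee_py_spec : Claim_equal_hex_from_bits_ieee_py := by
  unfold Claim_equal_hex_from_bits_ieee_py
  intro bits _
  unfold Spec_hex_from_bits_ieee_py hex_from_bits_ieee_py hex_from_bits_ieee_py_alt pvFmt08X
  simp only []
  rw [pvA_loop bits (min 32 bits.length)]
  rw [Int.toNat_natCast]
  rw [pvVal_min]
  have hlt : pvVal bits 32 < 16^8 := by
    have := pvVal_lt bits 32
    norm_num at this ⊢
    omega
  rw [pvPad_hex 8 _ (by omega) hlt]
  congr 1
  apply List.map_congr_left
  intro j hj
  have hj8 : j < 8 := by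
    rw [List.mem_reverse, List.mem_range] at hj
    exact hj
  rw [show pvVal bits 32 = pvVal bits (8*4) by norm_num]
  rw [pvVal_group bits 8]
  rw [pvDigit_extract j 8 (pvNib bits) (pvNib_lt bits) hj8]
  rw [pvB_inner bits j]
  rw [Int.toNat_natCast]
  rfl
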